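-- pv_equiv track=rewrite | github.com/inistory/daily_coding | 백준/string/4659.py | has_three_consecutive
-- ===== SOURCE A (Python) =====
-- v = ['a','e','i','o','u']
--
-- def has_three_consecutive(word):
--     vowels = set(v)
--     count = 0
--     last_char_type = None
--
--     for char in word:
--         if char in vowels:
--             char_type = 'vowel'
--         else:
--             char_type = 'consonant'
--
--         if char_type == last_char_type:
--             count += 1
--         else:
--             count = 1
--             last_char_type = char_type
--
--         if count >= 3:
--             return True
--
--     return False
-- ===== SOURCE B (Python) =====
-- def has_three_consecutive(word):
--     types = [c in "aeiou" for c in word]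
--     return any(t1 == t2 == t3 for t1, t2, t3 in zip(types, types[1:], types[2:]))
-- ===== Notes on version B (the rewrite author's own statement) =====
-- stated objective: idiomatic
-- what changed: Replaces the interleaved run-counter/last-type state machine with a build-then-scan decomposition: map the word to a vowel/consonant boolean sequence, then test any window of three equal entries via zip.
import Mathlib
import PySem

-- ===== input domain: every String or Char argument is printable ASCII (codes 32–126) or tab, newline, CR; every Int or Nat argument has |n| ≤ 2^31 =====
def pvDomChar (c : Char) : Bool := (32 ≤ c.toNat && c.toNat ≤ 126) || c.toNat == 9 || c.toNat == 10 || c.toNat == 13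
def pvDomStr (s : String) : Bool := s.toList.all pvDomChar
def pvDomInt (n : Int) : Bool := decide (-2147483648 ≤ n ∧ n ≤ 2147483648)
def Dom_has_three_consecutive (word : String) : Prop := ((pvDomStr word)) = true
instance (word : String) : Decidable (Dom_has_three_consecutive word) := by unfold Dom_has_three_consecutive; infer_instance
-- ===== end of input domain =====

-- B replaces A's run-counter/last-type state machine by a map-to-type-sequence-then-scan-windows decomposition (idiomatic; same cost).

-- ===== PORT A =====
-- module-level constant v
def pv_v : List Char := ['a', 'e', 'i', 'o', 'u']

-- the for-loop of A: state (count, last_char_type); early 'return True' = stop recursing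
def hasThreeLoopA : List Char → Int → Option String → Bool
  | [], _, _ => false
  | c :: rest, count, last =>
    let char_type : String := if PySem.Set.contains (PySem.Set.ofList pv_v) c then "vowel" else "consonant"
    let st : Int × Option String :=
      if (some char_type == last) then (count + 1, last) else (1, some char_type)
    if st.1 ≥ 3 then true else hasThreeLoopA rest st.1 st.2

def has_three_consecutive (word : String) : Bool :=
  hasThreeLoopA word.toList 0 none

-- ===== PORT B =====
def has_three_consecutive_alt (word : String) : Bool :=
  let types : List Bool := word.toList.map (fun c => "aeiou".toList.contains c)
  (((types.zip (types.drop 1)).zip (types.drop 2)).any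
    (fun p => p.1.1 == p.1.2 && p.1.2 == p.2))   -- types[1:], types[2:] on a list are drop 1 / drop 2

-- ===== PRECONDITION & SPEC =====
def Spec_has_three_consecutive (word : String) (out : Bool) : Prop := out = has_three_consecutive_alt word
instance (word : String) (out : Bool) : Decidable (Spec_has_three_consecutive word out) := by unfold Spec_has_three_consecutive; infer_instance

-- ===== CLAIM (what is proved, stated in full; the proofs are below) =====
def Claim_equal_has_three_consecutive : Prop := ∀ (word : String), Dom_has_three_consecutive word → Spec_has_three_consecutive word (has_three_consecutive word)

-- ===== LEMMAS AND PROOFS =====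

-- abstract "triple of equal adjacent entries" on the boolean type sequence
def tri : List Bool → Bool
  | a :: b :: c :: rest => (a == b && b == c) || tri (b :: c :: rest)
  | _ => false

def typ (c : Char) : Bool := "aeiou".toList.contains c

def st (b : Bool) : String := if b then "vowel" else "consonant"

theorem st_inj (x y : Bool) : (st x = st y) ↔ x = y := by
  cases x <;> cases y <;> simp [st]

theorem ct_eq (c : Char) :
    (if PySem.Set.contains (PySem.Set.ofList pv_v) c then ("vowel" : String) else "consonant") = st (typ c) := by
  have hl : "aeiou".toList = pv_v := by decide
  have h : PySem.Set.contains (PySem.Set.ofList pv_v) c = typ c := by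
    simp [typ, ← hl, PySem.Set.contains_eq_listContains, PySem.Set.mem_ofList]
  rw [h]; cases typ c <;> simp [st]

theorem tri_cons_ne (b t : Bool) (l : List Bool) (h : b ≠ t) : tri (b :: t :: l) = tri (t :: l) := by
  cases l <;> simp [tri, h]

-- B's zip-any computes tri
theorem altCore_eq_tri (ts : List Bool) :
    ((ts.zip (ts.drop 1)).zip (ts.drop 2)).any (fun p => p.1.1 == p.1.2 && p.1.2 == p.2) = tri ts := by
  match ts with
  | [] => rfl
  | [_] => rfl
  | [_, _] => rfl
  | a :: b :: c :: rest =>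
    simp only [List.drop, List.zip, List.zipWith, List.any, tri]
    rw [← altCore_eq_tri (b :: c :: rest)]
    rfl
termination_by ts.length

-- loop invariant: with k (=1 or 2) same-type chars of type b just seen, the loop finds a run of 3
theorem loopA_inv (l : List Char) (b : Bool) :
    hasThreeLoopA l 1 (some (st b)) = tri (b :: l.map typ) ∧
    hasThreeLoopA l 2 (some (st b)) = tri (b :: b :: l.map typ) := by
  induction l generalizing b with
  | nil => cases b <;> simp [hasThreeLoopA, tri]
  | cons c rest ih =>
    constructor
    · by_cases h : typ c = b
      · simp only [hasThreeLoopA, ct_eq, h]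
        simp [(ih b).2, List.map]
        rw [h]
      · simp only [hasThreeLoopA, ct_eq]
        have hne : ¬ (st (typ c) = st b) := fun hc => h ((st_inj _ _).1 hc)
        simp [hne, (ih (typ c)).1, tri_cons_ne b (typ c) _ (Ne.symm h), List.map]
    · by_cases h : typ c = b
      · simp only [hasThreeLoopA, ct_eq, h]
        simp [tri, List.map]
        exact Or.inl h.symm
      · simp only [hasThreeLoopA, ct_eq]
        have hne : ¬ (st (typ c) = st b) := fun hc => h ((st_inj _ _).1 hc)
        simp [hne, (ih (typ c)).1, tri, tri_cons_ne b (typ c) _ (Ne.symm h), List.map]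
        exact fun hb => absurd hb.symm h

theorem loopA_start (l : List Char) : hasThreeLoopA l 0 none = tri (l.map typ) := by
  cases l with
  | nil => rfl
  | cons c rest =>
    have : hasThreeLoopA (c :: rest) 0 none = hasThreeLoopA rest 1 (some (st (typ c))) := by
      simp only [hasThreeLoopA, ct_eq]
      simp
    rw [this, (loopA_inv rest (typ c)).1]
    cases rest <;> simp [tri, List.map]

-- ===== VERDICT (by name: the statement is the Claim_ definition above) =====
theorem has_three_consecutive_spec : Claim_equal_has_three_consecutive := by
  intro word _
  unfold Spec_has_three_consecutive has_three_consecutive has_three_consecutive_alt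
  rw [loopA_start, altCore_eq_tri]
  rfl
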